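-- pv_equiv track=rewrite | github.com/Fondamenti18/fondamenti-di-programmazione | students/1808114/homework02/program02.py | diz_gen
-- ===== SOURCE A (Python) =====
-- def space_rmv_i(lst, t = 0):
--     if t == 1: lst = lst.split(' ')
--     while True:
--         if lst[0] == '' and len(lst) > 1:
--             del lst[0]
--         else: break
--     if t == 1: return " ".join(lst)
--     else: return lst
--
-- def space_rmv_f(lst, t = 0):
--     if t == 1: lst = lst.split(' ')
--     while True:
--         if lst[len(lst)-1] == '' and len(lst) > 1:
--             del lst[len(lst)-1]
--         else: break
--     if t == 1: return " ".join(lst)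
--     else: return lst
--
-- def find_id(string):
--     i = 0
--     strid = ""
--     while True:
--         if string[i].isdigit():
--             strid += string[i]
--             i += 1
--         else: break
--     return strid
--
-- def risfc(lst, keys):
--     c = 0
--     while c < len(lst):
--         lst[c] = lst[c].replace(str(keys[c]), " ", 1).replace("sub", " ", 1)
--         lst[c] = space_rmv_i(lst[c], 1)
--         lst[c] = space_rmv_f(lst[c], 1)
--         c += 1
--     return lst
--
-- def diz_gen(lst):
--     c = 0
--     keys = ""
--     while c < len(lst):
--         keys += str(find_id(lst[c])) + " "
--         c += 1
--     keys = keys.split(" ")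
--     lst = risfc(lst, keys)
--     diz = dict(zip(keys, lst))
--     return diz
-- ===== SOURCE B (Python) =====
-- def diz_gen(lst):
--     # Index/slice surgery instead of A's replace+split/join pipeline: the key is the
--     # maximal digit prefix, so "replace(key,' ',1)" is just dropping that prefix; the
--     # first "sub" is spliced out by find+slicing; the spaces are trimmed with a
--     # two-pointer scan.  Builds the dict directly in one pass (no keys string, no zip).
--     # Mutates lst in place like the original.
--     diz = {}
--     for i in range(len(lst)):
--         s = lst[i]
--         n = 0
--         while n < len(s) and s[n].isdigit():
--             n += 1
--         key = s[:n]
--         rest = s[n:]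
--         j = rest.find("sub")
--         if j >= 0:
--             rest = rest[:j] + " " + rest[j + 3:]
--         lo = 0
--         while lo < len(rest) and rest[lo] == " ":
--             lo += 1
--         hi = len(rest)
--         while hi > lo and rest[hi - 1] == " ":
--             hi -= 1
--         val = rest[lo:hi]
--         lst[i] = val
--         diz[key] = val
--     return diz
-- ===== Notes on version B (the rewrite author's own statement) =====
-- stated objective: faster
-- what changed: Replaces A's staged pipeline (concatenate all keys into one string and re-split it, replace(key)/replace('sub') plus split/join-based space trimming, dict(zip)) with per-element index/slice surgery: drop the digit prefix directly, splice out the first 'sub' via find and slicing, trim spaces with a two-pointer index scan, and insert into the dict in one pass.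
import Mathlib
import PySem

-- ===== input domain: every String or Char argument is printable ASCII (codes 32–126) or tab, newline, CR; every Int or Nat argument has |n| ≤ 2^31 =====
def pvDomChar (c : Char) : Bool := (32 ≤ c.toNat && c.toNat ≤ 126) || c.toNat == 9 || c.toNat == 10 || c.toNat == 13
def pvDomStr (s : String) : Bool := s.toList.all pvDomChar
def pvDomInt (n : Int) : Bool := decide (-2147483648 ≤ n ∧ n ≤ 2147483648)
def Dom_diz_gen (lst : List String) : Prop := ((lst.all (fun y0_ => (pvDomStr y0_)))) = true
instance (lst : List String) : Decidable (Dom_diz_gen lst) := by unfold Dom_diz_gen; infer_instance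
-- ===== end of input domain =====

-- B replaces A's staged pipeline (keys string re-split, replace/split/join transform
-- pass, dict(zip)) with per-element index/slice surgery: drop the digit prefix, splice
-- out the first "sub" via find + slicing, trim spaces with a two-pointer scan, insert
-- into the dict in one pass; no quadratic keys-string rebuild (objective: faster).  Both Pythons mutate the argument
-- list in place identically; the equivalence proved here is about the RETURN value only.

-- ===== PORT A =====
-- s.replace(old, new, 1): exact: first occurrence via Chars.find ("" is found at 0).
def pvReplace1 (cs old new : List Char) : List Char :=
  let i := PySem.Chars.find cs old
  if i = -1 then cs else cs.take i.toNat ++ new ++ cs.drop (i.toNat + old.length)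

-- find_id: collect leading digits.  Python raises IndexError when the index runs off
-- the end (element empty or all digits); those inputs are excluded by Pre_diz_gen.
def pvFindId : List Char → List Char
  | [] => []
  | c :: r => if PySem.Chars.isdigit c then c :: pvFindId r else []

-- space_rmv_i's while loop: del lst[0] while it is '' and len > 1
def pvRmvI : List (List Char) → List (List Char)
  | [] :: (x :: xs) => pvRmvI (x :: xs)
  | l => l

-- space_rmv_f's while loop: del lst[-1] while it is '' and len > 1
def pvRmvF (l : List (List Char)) : List (List Char) :=
  if _h : l.getLast? = some [] ∧ 1 < l.length then pvRmvF l.dropLast else l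
termination_by l.length
decreasing_by simp [List.length_dropLast]; omega

def pvSpaceRmvI (cs : List Char) : List Char :=
  PySem.Chars.join [' '] (pvRmvI (PySem.Chars.splitOn cs [' ']))

def pvSpaceRmvF (cs : List Char) : List Char :=
  PySem.Chars.join [' '] (pvRmvF (PySem.Chars.splitOn cs [' ']))

-- risfc's while loop over c < len(lst), using keys[c] (keys is always one longer)
def pvRisfc : List (List Char) → List (List Char) → List (List Char)
  | [], _ => []
  | x :: xs, k :: ks =>
      pvSpaceRmvF (pvSpaceRmvI (pvReplace1 (pvReplace1 x k [' ']) "sub".toList [' ']))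
        :: pvRisfc xs ks
  | x :: xs, [] => x :: xs  -- unreachable from diz_gen: Python keys[c] would raise

def diz_gen (lst : List String) : List (String × String) :=
  let lstC := lst.map String.toList
  let keysStr := lstC.foldl (fun acc s => acc ++ (pvFindId s ++ [' '])) []
  let keys := PySem.Chars.splitOn keysStr [' ']
  let vals := pvRisfc lstC keys
  let d := (keys.zip vals).foldl (fun d p => d.insert p.1 p.2)
    (PySem.Dict.empty (κ := List Char) (ν := List Char))
  d.items.map (fun p => (String.mk p.1, String.mk p.2))

-- ===== PORT B =====
-- n loop: while n < len(s) and s[n].isdigit(): n += 1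
def bDigits : List Char → Nat
  | [] => 0
  | c :: r => if PySem.Chars.isdigit c then bDigits r + 1 else 0

-- j = rest.find("sub"); if j >= 0: rest = rest[:j] + " " + rest[j+3:]
def bSub (rest : List Char) : List Char :=
  let j := PySem.Chars.find rest "sub".toList
  if 0 ≤ j then rest.take j.toNat ++ [' '] ++ rest.drop (j.toNat + 3) else rest

-- lo loop: while lo < len(rest) and rest[lo] == ' ': lo += 1
def bLo : List Char → Nat
  | [] => 0
  | c :: r => if c = ' ' then bLo r + 1 else 0

-- hi loop: while hi > lo and rest[hi-1] == ' ': hi -= 1  (rest[hi-1] always in range,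
-- so getD is exact; structural recursion on hi)
def bHi (rest : List Char) (lo : Nat) : Nat → Nat
  | 0 => 0
  | hi + 1 => if lo < hi + 1 ∧ rest.getD hi ' ' = ' ' then bHi rest lo hi else hi + 1

-- key = s[:n]; rest = (sub-splice of s[n:]); val = rest[lo:hi]
def bVal (s : List Char) : List Char :=
  let rest := bSub (s.drop (bDigits s))
  (rest.drop (bLo rest)).take (bHi rest (bLo rest) rest.length - bLo rest)

def diz_gen_alt (lst : List String) : List (String × String) :=
  let d := lst.foldl
    (fun d s => d.insert (s.toList.take (bDigits s.toList)) (bVal s.toList))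
    (PySem.Dict.empty (κ := List Char) (ν := List Char))
  d.items.map (fun p => (String.mk p.1, String.mk p.2))

-- ===== PRECONDITION & SPEC =====
-- Pre_ excludes exactly the inputs where Python A raises: find_id runs off the end of
-- an element whose characters are all digits (including the empty string).
def Pre_diz_gen (lst : List String) : Prop :=
  ∀ s ∈ lst, (s.toList.all (fun c => PySem.Chars.isdigit c)) = false
instance (lst : List String) : Decidable (Pre_diz_gen lst) := by unfold Pre_diz_gen; infer_instance

def pvWitness_diz_gen : List String := ["12 sub anna", "no key", "  7 spaced sub  "]

def Spec_diz_gen (lst : List String) (out : List (String × String)) : Prop := out = diz_gen_alt lst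
instance (lst : List String) (out : List (String × String)) : Decidable (Spec_diz_gen lst out) := by unfold Spec_diz_gen; infer_instance

-- ===== CLAIM (what is proved, stated in full; the proofs are below) =====
def Claim_equal_diz_gen : Prop := ∀ (lst : List String), Dom_diz_gen lst → Pre_diz_gen lst → Spec_diz_gen lst (diz_gen lst)
-- ===== LEMMAS AND PROOFS =====

-- proof-side names for the per-element pieces of A's transformation
def pvKeyB (cs : List Char) : List Char := cs.takeWhile (fun c => PySem.Chars.isdigit c)

def pvValB (cs : List Char) : List Char :=
  PySem.Chars.stripChars (pvReplace1 (pvReplace1 cs (pvKeyB cs) [' ']) "sub".toList [' ']) [' ']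

theorem pvFindId_eq_takeWhile (cs : List Char) : pvFindId cs = pvKeyB cs := by
  induction cs with
  | nil => rfl
  | cons c r ih => simp [pvFindId, pvKeyB, List.takeWhile] at *; split <;> simp_all

theorem pvFindId_no_space (cs : List Char) : ' ' ∉ pvFindId cs := by
  induction cs with
  | nil => simp [pvFindId]
  | cons c r ih =>
    simp only [pvFindId]
    split
    · rename_i h
      intro hm
      rcases List.mem_cons.mp hm with rfl | hm
      · exact absurd h (by decide)
      · exact ih hm
    · simp

-- PySem's splitOn with the one-space separator is Mathlib's List.splitOn ' '
theorem splitOn_go_eq (l : List Char) : ∀ (fuel : Nat) (cur : List Char) (acc : List (List Char)),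
    l.length < fuel →
    PySem.Chars.splitOn.go [' '] fuel l cur acc
      = acc.reverse ++ ((l.splitOn ' ').modifyHead (cur.reverse ++ ·)) := by
  induction l with
  | nil =>
    intro fuel cur acc h
    match fuel, h with
    | fuel+1, _ => simp [PySem.Chars.splitOn.go, List.splitOn]
  | cons c rest ih =>
    intro fuel cur acc h
    match fuel, h with
    | fuel+1, h =>
      by_cases hc : c = ' '
      · subst hc
        rw [show PySem.Chars.splitOn.go [' '] (fuel+1) (' '::rest) cur acc
            = PySem.Chars.splitOn.go [' '] fuel rest [] (cur.reverse :: acc) by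
          simp [PySem.Chars.splitOn.go, List.isPrefixOf]]
        rw [ih fuel [] _ (by simpa using h)]
        simp [List.splitOn, List.splitOnP_cons]
        exact congrFun List.modifyHead_id _
      · rw [show PySem.Chars.splitOn.go [' '] (fuel+1) (c::rest) cur acc
            = PySem.Chars.splitOn.go [' '] fuel rest (c :: cur) acc by
          have hcc : (' ' == c) = false := by simp [Ne.symm hc]
          simp [PySem.Chars.splitOn.go, List.isPrefixOf, hcc]]
        rw [ih fuel _ _ (by simpa using h)]
        simp [List.splitOn, List.splitOnP_cons, hc, List.modifyHead_modifyHead]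
        rfl

theorem pySplitOn_eq (cs : List Char) :
    PySem.Chars.splitOn cs [' '] = cs.splitOn ' ' := by
  rw [PySem.Chars.splitOn, splitOn_go_eq cs (cs.length+1) [] [] (by omega)]
  simp
  exact congrFun List.modifyHead_id _

theorem splitOn_space_head (r : List Char) :
    (' ' :: r).splitOn ' ' = [] :: r.splitOn ' ' := by
  simp [List.splitOn, List.splitOnP_cons]

theorem splitOn_char_head (c : Char) (r : List Char) (hc : c ≠ ' ') :
    (c :: r).splitOn ' ' = (r.splitOn ' ').modifyHead (c :: ·) := by
  simp [List.splitOn, List.splitOnP_cons, hc]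

theorem splitOn_exists_cons (r : List Char) : ∃ p ps, r.splitOn ' ' = p :: ps :=
  List.exists_cons_of_ne_nil (by simp [List.splitOn]; exact List.splitOnP_ne_nil _ _)

theorem splitOn_append_of_no_space (a rest : List Char) (h : ' ' ∉ a) :
    (a ++ ' ' :: rest).splitOn ' ' = a :: rest.splitOn ' ' := by
  induction a with
  | nil => simp [List.splitOn, List.splitOnP_cons]
  | cons c a' ih =>
    have hc : c ≠ ' ' := fun hh => h (hh ▸ List.mem_cons_self)
    have ih' := ih (fun hm => h (List.mem_cons_of_mem _ hm))
    simp only [List.cons_append, List.splitOn, List.splitOnP_cons, beq_iff_eq, hc]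
    simp only [List.splitOn] at ih'
    rw [if_neg (by simp [hc]), ih']
    rfl

theorem intercalate_two (a b : List Char) (t : List (List Char)) :
    [' '].intercalate (a :: b :: t) = a ++ ' ' :: [' '].intercalate (b :: t) := by
  simp [List.intercalate, List.intersperse]

theorem intercalate_cons_cons (c : Char) (p : List Char) (ps : List (List Char)) :
    [' '].intercalate ((c :: p) :: ps) = c :: [' '].intercalate (p :: ps) := by
  cases ps with
  | nil => simp [List.intercalate]
  | cons q qs => rw [intercalate_two, intercalate_two]; simp

theorem pvSpaceRmvI_eq (cs : List Char) :
    pvSpaceRmvI cs = cs.dropWhile (· == ' ') := by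
  rw [pvSpaceRmvI, pySplitOn_eq]
  induction cs with
  | nil => simp [List.splitOn, pvRmvI, PySem.Chars.join, List.intercalate]
  | cons c r ih =>
    obtain ⟨p, ps, hps⟩ := splitOn_exists_cons r
    by_cases hc : c = ' '
    · subst hc
      rw [splitOn_space_head, hps,
        show pvRmvI ([] :: p :: ps) = pvRmvI (p :: ps) from rfl, ← hps, ih]
      simp [List.dropWhile]
    · rw [splitOn_char_head c r hc, hps]
      simp only [List.modifyHead]
      rw [show pvRmvI ((c :: p) :: ps) = (c :: p) :: ps from by cases ps <;> rfl]
      have hr : [' '].intercalate (p :: ps) = r := by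
        rw [← hps]; exact List.intercalate_splitOn r ' '
      have hcb : (c == ' ') = false := by simp [hc]
      simp [PySem.Chars.join, intercalate_cons_cons, hr, List.dropWhile, hcb]

theorem rdropWhile_cons {α : Type} (p : α → Bool) (a : α) (l : List α) :
    (a :: l).rdropWhile p
      = if p a ∧ l.rdropWhile p = [] then [] else a :: l.rdropWhile p := by
  rw [show a :: l = [a] ++ l from rfl]
  rw [List.rdropWhile, List.reverse_append, List.dropWhile_append]
  by_cases hl : (l.reverse.dropWhile p).isEmpty
  · rw [if_pos hl]
    have hnil : l.rdropWhile p = [] := by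
      rw [List.rdropWhile]; simp [List.isEmpty_iff] at hl
      simp
      exact hl
    by_cases hp : p a
    · simp [List.dropWhile, hp, hnil]
    · simp [hp, hnil]
  · rw [if_neg hl]
    have hne : l.rdropWhile p ≠ [] := by
      rw [List.rdropWhile]; simp [List.isEmpty_iff] at hl; simp [hl]
    rw [if_neg (by tauto)]
    rw [List.rdropWhile]
    simp

theorem pvRmvF_cons (x : List Char) (xs : List (List Char)) :
    pvRmvF (x :: xs) = x :: xs.rdropWhile (· == []) := by
  induction xs using List.reverseRecOn with
  | nil => rw [pvRmvF]; simp
  | append_singleton ys y ih =>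
    have hsh : x :: (ys ++ [y]) = (x :: ys) ++ [y] := rfl
    by_cases hy : y = []
    · subst hy
      have hlast : (x :: (ys ++ [([] : List Char)])).getLast? = some [] := by
        rw [hsh, List.getLast?_concat]
      rw [pvRmvF, dif_pos ⟨hlast, by simp⟩]
      rw [hsh, List.dropLast_concat]
      rw [ih, List.rdropWhile_concat_pos _ _ _ (by simp)]
    · have hlast : ¬ ((x :: (ys ++ [y])).getLast? = some [] ∧ 1 < (x :: (ys ++ [y])).length) := by
        rw [hsh, List.getLast?_concat]
        simp [hy]
      rw [pvRmvF, dif_neg hlast]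
      rw [List.rdropWhile_concat_neg _ _ _ (by simp [hy])]

theorem splitOn_all_empty_iff (r : List Char) :
    (∀ q ∈ r.splitOn ' ', q = []) ↔ (∀ x ∈ r, x = ' ') := by
  induction r with
  | nil => simp [List.splitOn]
  | cons c r ih =>
    by_cases hc : c = ' '
    · subst hc
      rw [splitOn_space_head]
      simp [ih]
    · rw [splitOn_char_head c r hc]
      obtain ⟨p, ps, hps⟩ := splitOn_exists_cons r
      rw [hps]
      constructor
      · intro h; exact absurd (h (c :: p) (by simp [List.modifyHead])) (by simp)
      · intro h; exact absurd (h c (by simp)) hc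

theorem pvSpaceRmvF_eq (cs : List Char) :
    pvSpaceRmvF cs = cs.rdropWhile (· == ' ') := by
  rw [pvSpaceRmvF, pySplitOn_eq]
  induction cs with
  | nil => simp [List.splitOn, pvRmvF, PySem.Chars.join, List.intercalate, List.rdropWhile]
  | cons c r ih =>
    obtain ⟨p, ps, hps⟩ := splitOn_exists_cons r
    rw [hps, pvRmvF_cons] at ih
    by_cases hc : c = ' '
    · subst hc
      rw [splitOn_space_head, hps, pvRmvF_cons, rdropWhile_cons (· == []) p ps]
      by_cases hz : (p == []) = true ∧ ps.rdropWhile (· == []) = []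
      · rw [if_pos hz]
        have hallparts : ∀ q ∈ r.splitOn ' ', q = [] := by
          rw [hps]
          intro q hq
          rcases List.mem_cons.mp hq with rfl | hq
          · simpa using hz.1
          · exact List.rdropWhile_eq_nil_iff.mp hz.2 q hq |> eq_of_beq
        have hallsp : ∀ x ∈ (' ' :: r), x = ' ' := by
          intro x hx
          rcases List.mem_cons.mp hx with rfl | hx
          · rfl
          · exact (splitOn_all_empty_iff r).mp hallparts x hx
        rw [List.rdropWhile_eq_nil_iff.mpr (by intro x hx; simp [hallsp x hx])]
        simp [PySem.Chars.join, List.intercalate]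
      · rw [if_neg hz]
        have hrne : r.rdropWhile (· == ' ') ≠ [] := by
          intro hnil
          apply hz
          have hallsp : ∀ x ∈ r, x = ' ' := by
            intro x hx
            simpa using List.rdropWhile_eq_nil_iff.mp hnil x hx
          have := (splitOn_all_empty_iff r).mpr hallsp
          rw [hps] at this
          constructor
          · simpa using this p (by simp)
          · exact List.rdropWhile_eq_nil_iff.mpr
              (by intro q hq; simp [this q (List.mem_cons_of_mem _ hq)])
        rw [show PySem.Chars.join [' '] ([] :: p :: ps.rdropWhile (· == []))
            = ' ' :: PySem.Chars.join [' '] (p :: ps.rdropWhile (· == [])) from by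
          simp [PySem.Chars.join, intercalate_two]]
        rw [show PySem.Chars.join [' '] (p :: ps.rdropWhile (· == []))
            = r.rdropWhile (· == ' ') from ih]
        rw [rdropWhile_cons]
        simp [hrne]
    · rw [splitOn_char_head c r hc, hps]
      simp only [List.modifyHead]
      rw [pvRmvF_cons]
      rw [show PySem.Chars.join [' '] ((c :: p) :: ps.rdropWhile (· == []))
          = c :: PySem.Chars.join [' '] (p :: ps.rdropWhile (· == [])) from by
        simp [PySem.Chars.join, intercalate_cons_cons]]
      rw [show PySem.Chars.join [' '] (p :: ps.rdropWhile (· == []))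
          = r.rdropWhile (· == ' ') from ih]
      rw [rdropWhile_cons]
      simp [hc]

-- A's split/join space stripping is strip(' ') (stripChars _ [' '])
theorem transform_eq (x : List Char) :
    pvSpaceRmvF (pvSpaceRmvI x) = PySem.Chars.stripChars x [' '] := by
  rw [pvSpaceRmvF_eq, pvSpaceRmvI_eq, PySem.Chars.stripChars]
  have hp : (fun c => ([' '] : List Char).contains c) = (fun c => c == ' ') := by
    funext c
    simp only [List.contains_eq_mem, List.mem_singleton]
    rfl
  rw [hp, ← List.rdropWhile]

theorem keys_eq (L : List (List Char)) :
    (L.foldl (fun acc s => acc ++ (pvFindId s ++ [' '])) []).splitOn ' '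
      = L.map pvFindId ++ [[]] := by
  rw [PySem.List.foldl_append_eq_flatMap (fun s => pvFindId s ++ [' ']) L []]
  simp only [List.nil_append]
  induction L with
  | nil => simp [List.splitOn]
  | cons x xs ih =>
    rw [List.flatMap_cons, List.append_assoc,
      show [' '] ++ xs.flatMap (fun s => pvFindId s ++ [' '])
        = ' ' :: xs.flatMap (fun s => pvFindId s ++ [' ']) from rfl,
      splitOn_append_of_no_space _ _ (pvFindId_no_space x), ih]
    rfl

theorem risfc_eq (L ks : List (List Char)) :
    pvRisfc L (L.map pvFindId ++ ks) = L.map (fun x => pvValB x) := by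
  induction L with
  | nil => rfl
  | cons x xs ih =>
    simp only [List.map_cons, List.cons_append, pvRisfc]
    rw [ih]
    congr 1
    rw [transform_eq, pvFindId_eq_takeWhile]
    rfl

theorem zip_pad (L : List (List Char)) (f g : List Char → List Char) (t : List (List Char)) :
    (L.map f ++ t).zip (L.map g) = L.map (fun x => (f x, g x)) := by
  induction L with
  | nil => simp
  | cons x xs ih => simp [ih]

-- ===== new B-side lemmas =====

theorem dropWhile_eq_drop_tw (p : Char → Bool) (l : List Char) :
    l.drop (l.takeWhile p).length = l.dropWhile p := by
  induction l with
  | nil => rfl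
  | cons c r ih =>
    by_cases hc : p c <;> simp [List.dropWhile_cons, List.takeWhile_cons, hc, ih]

-- find points at m when m is the first occurrence
theorem find_eq_of_first (s sub : List Char) (m : Nat)
    (h1 : sub <+: s.drop m) (h2 : ∀ i < m, ¬ sub <+: s.drop i) :
    PySem.Chars.find s sub = (m : Int) := by
  have hinf : sub <:+: s := h1.isInfix.trans (List.drop_suffix m s).isInfix
  have h0 : 0 ≤ PySem.Chars.find s sub := (PySem.Chars.find_nonneg_iff s sub).mpr hinf
  obtain ⟨hp, hmin⟩ := PySem.Chars.find_spec h0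
  have hle : ¬ (PySem.Chars.find s sub).toNat < m := fun hlt => h2 _ hlt hp
  have hge : ¬ m < (PySem.Chars.find s sub).toNat := fun hlt => hmin m hlt h1
  omega

theorem find_prefix (s sub : List Char) (h : sub <+: s) :
    PySem.Chars.find s sub = 0 :=
  find_eq_of_first s sub 0 (by simpa using h) (by omega)

theorem find_cons_not_prefix (c : Char) (r sub : List Char) (h : ¬ sub <+: (c :: r)) :
    PySem.Chars.find (c :: r) sub
      = if PySem.Chars.find r sub = -1 then -1 else PySem.Chars.find r sub + 1 := by
  by_cases hr : PySem.Chars.find r sub = -1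
  · rw [if_pos hr]
    rw [PySem.Chars.find_eq_neg_one_iff] at hr ⊢
    intro hinf
    rcases List.infix_cons_iff.mp hinf with hp | hinf'
    · exact h hp
    · exact hr hinf'
  · rw [if_neg hr]
    have h0 : 0 ≤ PySem.Chars.find r sub := by
      have := PySem.Chars.neg_one_le_find r sub
      omega
    obtain ⟨hp, hmin⟩ := PySem.Chars.find_spec h0
    have heq := find_eq_of_first (c :: r) sub ((PySem.Chars.find r sub).toNat + 1)
      (by simpa using hp)
      (by
        intro i hi
        match i with
        | 0 => simpa using h
        | (i' + 1) =>
          intro hpre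
          exact hmin i' (by omega) (by simpa using hpre))
    rw [heq]
    omega

theorem bDigits_eq (x : List Char) : bDigits x = (pvKeyB x).length := by
  induction x with
  | nil => rfl
  | cons c r ih => simp only [bDigits, pvKeyB, List.takeWhile] at *; split <;> simp_all

theorem key_take (x : List Char) : pvKeyB x = x.take (bDigits x) := by
  rw [bDigits_eq]
  exact ((List.prefix_iff_eq_take).mp (List.takeWhile_prefix _)).symm ▸ rfl

theorem replace_key (x : List Char) :
    pvReplace1 x (pvKeyB x) [' '] = ' ' :: x.drop (bDigits x) := by
  have hf : PySem.Chars.find x (pvKeyB x) = 0 :=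
    find_prefix x _ (List.takeWhile_prefix _)
  simp [pvReplace1, hf, bDigits_eq]

theorem replace_sub (r : List Char) :
    pvReplace1 (' ' :: r) "sub".toList [' '] = ' ' :: bSub r := by
  have hnp : ¬ ((['s', 'u', 'b'] : List Char) <+: (' ' :: r)) := by
    intro hp
    exact absurd (List.cons_prefix_cons.mp hp).1 (by decide)
  have hfind := find_cons_not_prefix ' ' r ['s', 'u', 'b'] hnp
  simp only [pvReplace1, bSub, show "sub".toList = ['s', 'u', 'b'] from rfl]
  by_cases hr : PySem.Chars.find r ['s', 'u', 'b'] = -1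
  · rw [if_pos hr] at hfind
    have hneg : ¬ (0 ≤ PySem.Chars.find r ['s', 'u', 'b']) := by omega
    simp [hfind, hneg]
  · rw [if_neg hr] at hfind
    have h0 : 0 ≤ PySem.Chars.find r ['s', 'u', 'b'] := by
      have := PySem.Chars.neg_one_le_find r ['s', 'u', 'b']
      omega
    have hne : ¬ (PySem.Chars.find r ['s', 'u', 'b'] + 1 = -1) := by omega
    have htn : (PySem.Chars.find r ['s', 'u', 'b'] + 1).toNat
        = (PySem.Chars.find r ['s', 'u', 'b']).toNat + 1 := by omega
    simp only [hfind, if_neg hne, if_pos h0, htn]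
    simp [List.take_succ_cons, List.drop_succ_cons]

theorem stripChars_space (x : List Char) :
    PySem.Chars.stripChars x [' ']
      = (x.dropWhile (fun c => c == ' ')).rdropWhile (fun c => c == ' ') := by
  rw [PySem.Chars.stripChars]
  have hp : (fun c => ([' '] : List Char).contains c) = (fun c => c == ' ') := by
    funext c
    simp only [List.contains_eq_mem, List.mem_singleton]
    rfl
  rw [hp, ← List.rdropWhile]

theorem bLo_eq (t : List Char) : bLo t = (t.takeWhile (fun c => c == ' ')).length := by
  induction t with
  | nil => rfl
  | cons c r ih =>
    by_cases hc : c = ' '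
    · simp [bLo, List.takeWhile_cons, hc, ih]
    · simp [bLo, List.takeWhile_cons, hc]

theorem bHi_succ (rest : List Char) (lo hi : Nat) :
    bHi rest lo (hi + 1)
      = if lo < hi + 1 ∧ rest.getD hi ' ' = ' ' then bHi rest lo hi else hi + 1 := by
  rw [bHi]

theorem bHi_spec (w : List Char) : ∀ (v tail : List Char) (lo : Nat),
    (∀ c ∈ w, c = ' ') → lo ≤ v.length →
    (lo < v.length → v.getLast? ≠ some ' ') →
    bHi (v ++ w ++ tail) lo (v.length + w.length) = v.length := by
  induction w using List.reverseRecOn with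
  | nil =>
    intro v tail lo _ hle hlast
    simp only [List.append_nil, List.length_nil, Nat.add_zero]
    cases hv : v.length with
    | zero => rfl
    | succ m =>
      by_cases hlo : lo < m + 1
      · have hvne : v ≠ [] := by
          intro hnil
          rw [hnil] at hv
          simp at hv
        have hgetD : (v ++ tail).getD m ' ' = v.getLast?.getD ' ' := by
          rw [List.getD_eq_getElem?_getD, List.getElem?_append_left (by omega),
            List.getLast?_eq_getElem?, hv]
          simp
        have hcond : ¬ (lo < m + 1 ∧ (v ++ tail).getD m ' ' = ' ') := by
          rintro ⟨_, hsp⟩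
          rw [hgetD] at hsp
          obtain ⟨x, hx⟩ := List.getLast?_isSome.mpr hvne |> Option.isSome_iff_exists.mp
          rw [hx] at hsp
          simp only [Option.getD_some] at hsp
          exact hlast (by omega) (by rw [hx, hsp])
        rw [bHi_succ, if_neg hcond]
      · rw [bHi_succ, if_neg (fun hco => hlo hco.1)]
  | append_singleton w' c ihw =>
    intro v tail lo hall hle hlast
    have hc : c = ' ' := hall c (by simp)
    subst hc
    have hlen : v.length + (w' ++ [' ']).length = (v.length + w'.length) + 1 := by
      simp only [List.length_append, List.length_cons, List.length_nil]
      omega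
    rw [hlen]
    have hidx : (v ++ (w' ++ [' ']) ++ tail).getD (v.length + w'.length) ' ' = ' ' := by
      rw [List.getD_eq_getElem?_getD,
        show v ++ (w' ++ [' ']) ++ tail = (v ++ w') ++ (' ' :: tail) by simp,
        List.getElem?_append_right (by simp)]
      simp
    rw [bHi_succ, if_pos ⟨by omega, hidx⟩,
      show v ++ (w' ++ [' ']) ++ tail = v ++ w' ++ (' ' :: tail) by simp]
    exact ihw v (' ' :: tail) lo (fun c hc => hall c (by simp [hc])) hle hlast

theorem strip_two_pointer (t : List Char) :
    (t.dropWhile (fun c => c == ' ')).rdropWhile (fun c => c == ' ')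
      = (t.drop (bLo t)).take (bHi t (bLo t) t.length - bLo t) := by
  have hsplit : ∀ (u : List Char),
      u = u.rdropWhile (fun c => c == ' ')
        ++ (u.reverse.takeWhile (fun c => c == ' ')).reverse := by
    intro u
    rw [List.rdropWhile, ← List.reverse_append, List.takeWhile_append_dropWhile,
      List.reverse_reverse]
  have hdrop : t.drop (bLo t) = t.dropWhile (fun c => c == ' ') := by
    rw [bLo_eq, dropWhile_eq_drop_tw]
  have hwsp : ∀ c ∈ ((t.dropWhile (fun c => c == ' ')).reverse.takeWhile
      (fun c => c == ' ')).reverse, c = ' ' := by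
    intro c hc
    have := List.mem_takeWhile_imp (List.mem_reverse.mp hc)
    simpa using this
  have ht : t = (t.takeWhile (fun c => c == ' ')
        ++ (t.dropWhile (fun c => c == ' ')).rdropWhile (fun c => c == ' '))
      ++ ((t.dropWhile (fun c => c == ' ')).reverse.takeWhile (fun c => c == ' ')).reverse
      ++ [] := by
    conv_lhs => rw [← List.takeWhile_append_dropWhile (p := fun c => c == ' ') (l := t)]
    conv_lhs => rw [hsplit (t.dropWhile (fun c => c == ' '))]
    simp
  set v0 := (t.dropWhile (fun c => c == ' ')).rdropWhile (fun c => c == ' ') with hv0def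
  set wsp := ((t.dropWhile (fun c => c == ' ')).reverse.takeWhile
      (fun c => c == ' ')).reverse with hwdef
  set V := t.takeWhile (fun c => c == ' ') ++ v0 with hVdef
  have hlo : bLo t = (t.takeWhile (fun c => c == ' ')).length := bLo_eq t
  have hlen : t.length = V.length + wsp.length := by
    conv_lhs => rw [ht]
    simp
  have hle : bLo t ≤ V.length := by
    rw [hlo, hVdef]
    simp
  have hlast : bLo t < V.length → V.getLast? ≠ some ' ' := by
    intro hlt
    have hv0ne : v0 ≠ [] := by
      intro hnil
      rw [hVdef, hnil] at hlt
      simp [hlo] at hlt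
    rw [hVdef, List.getLast?_append_of_ne_nil _ hv0ne]
    intro heq
    obtain ⟨l', hl'⟩ := List.getLast?_eq_some_iff.mp heq
    have hidem : List.rdropWhile (fun c => c == ' ') v0 = v0 := by
      rw [hv0def]
      exact List.rdropWhile_idempotent _ _
    rw [hl', List.rdropWhile_concat_pos _ _ ' ' (by rfl)] at hidem
    have hle' := (List.rdropWhile_prefix (fun c => c == ' ') l').length_le
    rw [hidem] at hle'
    simp at hle'
  have hmain := bHi_spec wsp V [] (bLo t) hwsp hle hlast
  rw [← ht, ← hlen] at hmain
  rw [hmain, hdrop, hVdef, List.length_append, hlo,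
    show (t.takeWhile (fun c => c == ' ')).length + v0.length
      - (t.takeWhile (fun c => c == ' ')).length = v0.length by omega]
  exact List.prefix_iff_eq_take.mp (List.rdropWhile_prefix _ _)

theorem valB_eq (x : List Char) : pvValB x = bVal x := by
  rw [pvValB, bVal, replace_key, replace_sub, stripChars_space]
  rw [show ((' ' :: bSub (x.drop (bDigits x))).dropWhile (fun c => c == ' '))
      = (bSub (x.drop (bDigits x))).dropWhile (fun c => c == ' ') from by
    simp [List.dropWhile_cons]]
  rw [strip_two_pointer]

-- ===== VERDICT (by name: the statement is the Claim_ definition above) =====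
theorem diz_gen_spec : Claim_equal_diz_gen := by
  intro lst _ _
  unfold Spec_diz_gen diz_gen diz_gen_alt
  simp only []
  rw [pySplitOn_eq, keys_eq, risfc_eq _ [[]], zip_pad, List.foldl_map, List.foldl_map]
  simp only [pvFindId_eq_takeWhile, key_take, valB_eq]
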